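-- pv_equiv track=rewrite | github.com/Giovix92/GTools-Mac | modules/mkssdt.py | get_hex_starting_at
-- ===== SOURCE A (Python) =====
-- def is_hex(line):
-- 	return ':' in line.split('//')[0]
--
-- def get_hex(line):
-- 	# strip the header and commented end
-- 	return line.split(':')[1].split('//')[0].replace(' ','')
--
-- def get_hex_starting_at(dsdt_lines, start_index):
-- 	# Returns a tuple of the hex, and the ending index
-- 	hex_text = ''
-- 	index = -1
-- 	for i,x in enumerate(dsdt_lines[start_index:]):
-- 		if not is_hex(x):
-- 			break
-- 		hex_text += get_hex(x)
-- 		index = i+start_index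
-- 	return (hex_text, index)
-- ===== SOURCE B (Python) =====
-- def is_hex(line):
-- 	return ':' in line.split('//')[0]
--
-- def get_hex(line):
-- 	# strip the header and commented end
-- 	return line.split(':')[1].split('//')[0].replace(' ','')
--
-- def get_hex_starting_at(dsdt_lines, start_index):
-- 	# Two-phase: measure the maximal hex prefix of the slice, then join its
-- 	# hex texts and derive the ending index arithmetically.
-- 	tail = dsdt_lines[start_index:]
-- 	n = 0
-- 	while n < len(tail) and is_hex(tail[n]):
-- 		n += 1
-- 	hex_text = ''.join(get_hex(x) for x in tail[:n])
-- 	return (hex_text, start_index + n - 1 if n else -1)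
-- ===== Notes on version B (the rewrite author's own statement) =====
-- stated objective: alternative
-- what changed: Replaces A's fused break-loop that threads a string accumulator and a running ending index with a two-phase version: first measure the maximal hex prefix of the slice, then join the hex texts of that prefix and compute the ending index arithmetically as start_index + n - 1 (or -1 when the prefix is empty).
import Mathlib
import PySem

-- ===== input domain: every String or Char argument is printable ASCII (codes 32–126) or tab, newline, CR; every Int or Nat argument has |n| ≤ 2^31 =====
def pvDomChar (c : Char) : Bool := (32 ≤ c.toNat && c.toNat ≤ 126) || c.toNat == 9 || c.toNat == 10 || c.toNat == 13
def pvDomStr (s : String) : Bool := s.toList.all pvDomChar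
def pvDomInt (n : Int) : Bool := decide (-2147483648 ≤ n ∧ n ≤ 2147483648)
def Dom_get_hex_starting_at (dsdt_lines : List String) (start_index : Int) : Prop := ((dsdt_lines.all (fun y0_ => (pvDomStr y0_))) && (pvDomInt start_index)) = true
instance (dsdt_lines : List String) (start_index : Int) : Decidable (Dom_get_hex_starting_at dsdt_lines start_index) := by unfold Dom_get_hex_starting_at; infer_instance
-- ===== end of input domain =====

-- B replaces A's fused break-loop (running index + string accumulator) by two phases:
-- measure the maximal hex prefix, then join its hex texts and derive the index arithmetically.

-- shared module helpers (same in Source A and Source B)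
-- is_hex(line) = ':' in line.split('//')[0]   ('[0]' of a split is always present: .getD "" never fires)
def is_hex (line : String) : Bool :=
  PySem.Str.isIn ":" (((PySem.Str.split? line "//").getD []).headD "")

-- get_hex(line) = line.split(':')[1].split('//')[0].replace(' ','')   ('[1]' exists whenever is_hex holds)
def get_hex (line : String) : String :=
  PySem.Str.replace
    ((((PySem.Str.split? (((PySem.List.pyGet? ((PySem.Str.split? line ":").getD []) 1).getD "")) "//").getD []).headD ""))
    " " ""

-- ===== PORT A =====
-- 'for i,x in enumerate(dsdt_lines[start_index:]): if not is_hex(x): break; …'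
def aLoop (xs : List String) (i : Int) (start_index : Int) (hex_text : String) (index : Int) : String × Int :=
  match xs with
  | [] => (hex_text, index)
  | x :: rest =>
    if !is_hex x then (hex_text, index)
    else aLoop rest (i + 1) start_index (hex_text ++ get_hex x) (i + start_index)

def get_hex_starting_at (dsdt_lines : List String) (start_index : Int) : String × Int :=
  aLoop (PySem.List.slice dsdt_lines (some start_index) none) 0 start_index "" (-1)

-- ===== PORT B =====
-- 'n = 0; while n < len(tail) and is_hex(tail[n]): n += 1'
def bPrefixLen (xs : List String) : Nat :=
  match xs with
  | [] => 0
  | x :: rest => if is_hex x then bPrefixLen rest + 1 else 0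

def get_hex_starting_at_alt (dsdt_lines : List String) (start_index : Int) : String × Int :=
  let tail := PySem.List.slice dsdt_lines (some start_index) none
  let n := bPrefixLen tail
  let hex_text := PySem.Str.join "" ((tail.take n).map get_hex)
  (hex_text, if n ≠ 0 then start_index + (n : Int) - 1 else -1)

-- ===== PRECONDITION & SPEC =====
def Spec_get_hex_starting_at (dsdt_lines : List String) (start_index : Int) (out : String × Int) : Prop := out = get_hex_starting_at_alt dsdt_lines start_index
instance (dsdt_lines : List String) (start_index : Int) (out : String × Int) : Decidable (Spec_get_hex_starting_at dsdt_lines start_index out) := by unfold Spec_get_hex_starting_at; infer_instance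

-- ===== CLAIM (what is proved, stated in full; the proofs are below) =====
def Claim_equal_get_hex_starting_at : Prop := ∀ (dsdt_lines : List String) (start_index : Int), Dom_get_hex_starting_at dsdt_lines start_index → Spec_get_hex_starting_at dsdt_lines start_index (get_hex_starting_at dsdt_lines start_index)

-- ===== LEMMAS AND PROOFS =====

theorem join_empty_cons (a : String) (l : List String) :
    PySem.Str.join "" (a :: l) = a ++ PySem.Str.join "" l := by
  have h : PySem.Chars.join [] (a.toList :: l.map String.toList)
      = a.toList ++ PySem.Chars.join [] (l.map String.toList) := by
    cases l <;> simp [PySem.Chars.join, List.intercalate]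
  simp [PySem.Str.join, h, String.ofList_append]

theorem aLoop_eq (xs : List String) (i start_index : Int) (hex_text : String) (index : Int) :
    aLoop xs i start_index hex_text index =
      (hex_text ++ PySem.Str.join "" ((xs.take (bPrefixLen xs)).map get_hex),
       if bPrefixLen xs ≠ 0 then i + start_index + (bPrefixLen xs : Int) - 1 else index) := by
  induction xs generalizing i hex_text index with
  | nil => simp [aLoop, bPrefixLen, PySem.Str.join, PySem.Chars.join, List.intercalate]
  | cons x rest ih =>
    by_cases hx : is_hex x
    · rw [aLoop]
      have hb : bPrefixLen (x :: rest) = bPrefixLen rest + 1 := by simp [bPrefixLen, hx]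
      simp only [hx, Bool.not_true, Bool.false_eq_true, if_false, ih, hb,
        List.take_succ_cons, List.map_cons, join_empty_cons, String.append_assoc]
      by_cases h0 : bPrefixLen rest = 0
      · simp [h0]
      · simp [h0]; omega
    · rw [aLoop]
      have hb : bPrefixLen (x :: rest) = 0 := by simp [bPrefixLen, hx]
      simp [hx, hb, PySem.Str.join, PySem.Chars.join, List.intercalate]

-- ===== VERDICT (by name: the statement is the Claim_ definition above) =====
theorem get_hex_starting_at_spec : Claim_equal_get_hex_starting_at := by
  intro dsdt_lines start_index _
  show _ = _
  rw [get_hex_starting_at, aLoop_eq, get_hex_starting_at_alt]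
  by_cases h0 : bPrefixLen (PySem.List.slice dsdt_lines (some start_index) none) = 0 <;>
    simp [h0]
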